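-- pv_equiv track=rewrite | github.com/EILab-Polimi/ResLLM | resllm/batch/src/create_ablation_batch_requests.py | split_system_and_user
-- ===== SOURCE A (Python) =====
-- def split_system_and_user(observation):
--     """
--     Split observation into system message and user message.
--     System message ends before "It is the beginning of month".
--
--     Args:
--         observation: The full observation text
--
--     Returns:
--         Tuple of (system_message, user_message)
--     """
--     lines = observation.split('\n')
--     system_lines = []
--     user_lines = []
--     in_user_section = False
--
--     for line in lines:
--         if line.strip().startswith("It is the beginning of month"):
--             in_user_section = True
--
--         if in_user_section:
--             user_lines.append(line)
--         else:
--             system_lines.append(line)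
--
--     return '\n'.join(system_lines), '\n'.join(user_lines)
-- ===== SOURCE B (Python) =====
-- def split_system_and_user(observation):
--     """Find-then-slice: locate the first marker line, then split by slicing."""
--     lines = observation.split('\n')
--     idx = next((i for i, line in enumerate(lines)
--                 if line.strip().startswith("It is the beginning of month")),
--                len(lines))
--     return '\n'.join(lines[:idx]), '\n'.join(lines[idx:])
-- ===== Notes on version B (the rewrite author's own statement) =====
-- stated objective: simpler
-- what changed: Replaces the in_user_section flag and two per-line accumulator lists with a find-the-first-marker-index step followed by list slicing and joining.
import Mathlib
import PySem

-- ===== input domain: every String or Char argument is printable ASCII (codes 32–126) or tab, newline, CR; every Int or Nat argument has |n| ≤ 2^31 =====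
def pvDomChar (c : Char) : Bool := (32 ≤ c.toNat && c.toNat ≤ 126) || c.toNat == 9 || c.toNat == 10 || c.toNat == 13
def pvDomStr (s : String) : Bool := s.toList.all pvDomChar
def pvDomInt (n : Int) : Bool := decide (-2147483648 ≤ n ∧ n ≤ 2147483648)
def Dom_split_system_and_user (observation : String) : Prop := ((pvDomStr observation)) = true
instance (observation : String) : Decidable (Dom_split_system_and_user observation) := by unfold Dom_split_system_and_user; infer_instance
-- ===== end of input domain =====

-- B replaces A's in_user_section flag and two accumulator lists with a find-first-marker-index
-- step followed by slicing; objective: simpler.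

-- ===== PORT A =====
-- the per-line test 'line.strip().startswith("It is the beginning of month")' (shared by both ports)
def pvMarker (line : String) : Bool :=
  PySem.Str.startswith (PySem.Str.strip line) "It is the beginning of month"

-- one iteration of A's for-loop over (system_lines, user_lines, in_user_section)
def pvStepA (acc : List String × List String × Bool) (line : String) :
    List String × List String × Bool :=
  let in_user_section := acc.2.2 || pvMarker line
  if in_user_section then (acc.1, acc.2.1 ++ [line], in_user_section)
  else (acc.1 ++ [line], acc.2.1, in_user_section)

def split_system_and_user (observation : String) : String × String :=
  let lines := (PySem.Str.split? observation "\n").getD []   -- split? is some for the non-empty separator "\n"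
  let st := lines.foldl pvStepA ([], [], false)
  (PySem.Str.join "\n" st.1, PySem.Str.join "\n" st.2.1)

-- ===== PORT B =====
def split_system_and_user_alt (observation : String) : String × String :=
  let lines := (PySem.Str.split? observation "\n").getD []
  let idx := lines.findIdx pvMarker   -- = lines.length when no line matches, as next(..., len(lines))
  (PySem.Str.join "\n" (lines.take idx), PySem.Str.join "\n" (lines.drop idx))

-- ===== PRECONDITION & SPEC =====
def Spec_split_system_and_user (observation : String) (out : String × String) : Prop := out = split_system_and_user_alt observation
instance (observation : String) (out : String × String) : Decidable (Spec_split_system_and_user observation out) := by unfold Spec_split_system_and_user; infer_instance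

-- ===== CLAIM (what is proved, stated in full; the proofs are below) =====
def Claim_equal_split_system_and_user : Prop := ∀ (observation : String), Dom_split_system_and_user observation → Spec_split_system_and_user observation (split_system_and_user observation)

-- ===== LEMMAS AND PROOFS =====

/-- Once the flag is true, A's loop appends every remaining line to the user list. -/
lemma foldl_flag_true (lines : List String) (s u : List String) :
    lines.foldl pvStepA (s, u, true) = (s, u ++ lines, true) := by
  induction lines generalizing u with
  | nil => simp
  | cons l t ih =>
    rw [List.foldl_cons]
    have hstep : pvStepA (s, u, true) l = (s, u ++ [l], true) := by simp [pvStepA]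
    rw [hstep, ih]
    simp

/-- With the flag still false, A's loop splits the remaining lines at the first marker. -/
lemma foldl_flag_false (lines : List String) (s u : List String) :
    lines.foldl pvStepA (s, u, false)
    = (s ++ lines.take (lines.findIdx pvMarker),
       u ++ lines.drop (lines.findIdx pvMarker),
       decide (lines.findIdx pvMarker < lines.length)) := by
  induction lines generalizing s u with
  | nil => simp
  | cons l t ih =>
    rw [List.foldl_cons]
    by_cases h : pvMarker l
    · have hstep : pvStepA (s, u, false) l = (s, u ++ [l], true) := by simp [pvStepA, h]
      rw [hstep, foldl_flag_true]
      simp [List.findIdx_cons, h]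
    · have hstep : pvStepA (s, u, false) l = (s ++ [l], u, false) := by simp [pvStepA, h]
      rw [hstep, ih]
      simp [List.findIdx_cons, h]

-- ===== VERDICT (by name: the statement is the Claim_ definition above) =====
theorem split_system_and_user_spec : Claim_equal_split_system_and_user := by
  intro observation _
  unfold Spec_split_system_and_user split_system_and_user split_system_and_user_alt
  simp [foldl_flag_false]
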